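-- pv_equiv track=rewrite | github.com/kranthy09/engineering-excellence | solutions/queue/generate_numbers_with_given_digits.py | generate_n_numbers_of_5_6_digits
-- ===== SOURCE A (Python) =====
-- from collections import deque
--
-- def generate_n_numbers_of_5_6_digits(n):
--     """
--     Use a queue to store the 5, 6 digits as strings,
--     in order to represent long 'n' digits of number.
--
--     TC:
--     AS:
--     """
--     res = []
--     q = deque()  # init deque
--
--     # push 5, 6
--     q.append("5")
--     q.append("6")
--
--     # for number, formed by adding 5, 6
--     for i in range(n):
--         curr = q.popleft()
--         res.append(curr)
--         q.append(curr + "5")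
--         q.append(curr + "6")
--     return res
-- ===== SOURCE B (Python) =====
-- def generate_n_numbers_of_5_6_digits(n):
--     # Closed-form per index: the i-th BFS string is the bijective base-2
--     # representation of i+1 with digit values 0 -> '5', 1 -> '6'.
--     res = []
--     for i in range(n):
--         m = i + 1
--         digits = []
--         while m > 0:
--             m -= 1
--             digits.append('5' if m % 2 == 0 else '6')
--             m //= 2
--         res.append(''.join(reversed(digits)))
--     return res
-- ===== Notes on version B (the rewrite author's own statement) =====
-- stated objective: alternative
-- what changed: Replaces the BFS deque (pop front, push curr+'5'/curr+'6') with an independent per-index closed form: the i-th string is the bijective base-2 representation of i+1 with digits 0->'5', 1->'6', so no queue or parent-string reuse is needed and each element costs O(log i) extra memory instead of an O(n) queue.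
import Mathlib
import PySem

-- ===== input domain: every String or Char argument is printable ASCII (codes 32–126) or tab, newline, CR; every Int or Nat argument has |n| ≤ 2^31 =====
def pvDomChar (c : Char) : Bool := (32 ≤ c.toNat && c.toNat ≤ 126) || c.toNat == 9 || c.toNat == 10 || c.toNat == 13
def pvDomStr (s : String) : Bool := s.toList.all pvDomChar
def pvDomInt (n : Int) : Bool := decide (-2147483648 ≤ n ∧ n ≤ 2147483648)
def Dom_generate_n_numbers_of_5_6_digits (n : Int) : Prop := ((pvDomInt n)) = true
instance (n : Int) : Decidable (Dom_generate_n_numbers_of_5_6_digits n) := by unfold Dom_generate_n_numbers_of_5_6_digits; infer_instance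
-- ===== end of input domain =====

-- B replaces A's BFS deque with an independent per-index closed form (bijective
-- base-2 of i+1 with digits '5'/'6'); equivalence of return values is proved below.

-- ===== PORT A =====
-- one loop iteration: curr = q.popleft(); res.append(curr); q.append(curr+"5"); q.append(curr+"6")
-- (the [] branch is unreachable: the queue always holds ≥ 2 strings)
def stepA (st : List String × List String) : List String × List String :=
  match st with
  | (res, curr :: q) => (res ++ [curr], q ++ [curr ++ "5", curr ++ "6"])
  | (res, []) => (res, [])

def generate_n_numbers_of_5_6_digits (n : Int) : List String :=
  ((PySem.List.pyRange 0 n 1).foldl (fun st _i => stepA st) ([], ["5", "6"])).1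

-- ===== PORT B =====
-- the inner 'while m > 0: m -= 1; digits.append(…); m //= 2' loop, digits built head-first
def bDigits : Nat → List Char
  | 0 => []
  | m + 1 => (if m % 2 = 0 then '5' else '6') :: bDigits (m / 2)
decreasing_by exact Nat.lt_succ_of_le (Nat.div_le_self m 2)

def generate_n_numbers_of_5_6_digits_alt (n : Int) : List String :=
  (PySem.List.pyRange 0 n 1).foldl
    (fun res i => res ++ [String.ofList (bDigits (i + 1).toNat).reverse]) []

-- ===== PRECONDITION & SPEC =====
def Spec_generate_n_numbers_of_5_6_digits (n : Int) (out : List String) : Prop := out = generate_n_numbers_of_5_6_digits_alt n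
instance (n : Int) (out : List String) : Decidable (Spec_generate_n_numbers_of_5_6_digits n out) := by unfold Spec_generate_n_numbers_of_5_6_digits; infer_instance

-- ===== CLAIM (what is proved, stated in full; the proofs are below) =====
def Claim_equal_generate_n_numbers_of_5_6_digits : Prop := ∀ (n : Int), Dom_generate_n_numbers_of_5_6_digits n → Spec_generate_n_numbers_of_5_6_digits n (generate_n_numbers_of_5_6_digits n)

-- ===== LEMMAS AND PROOFS =====

-- the BFS string with 1-based index m (bijective base-2 of m over '5','6')
def bfsStr (m : Nat) : String := String.ofList (bDigits m).reverse

theorem bDigits_odd (q : Nat) : bDigits (2 * q + 1) = '5' :: bDigits q := by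
  rw [bDigits]
  simp [Nat.mul_mod_right]

theorem bDigits_even (q : Nat) : bDigits (2 * q + 2) = '6' :: bDigits q := by
  rw [bDigits]
  have h1 : (2 * q + 1) % 2 = 1 := by omega
  have h2 : (2 * q + 1) / 2 = q := by omega
  simp [h1, h2]

theorem bfsStr_odd (q : Nat) : bfsStr (2 * q + 1) = bfsStr q ++ "5" := by
  simp [bfsStr, bDigits_odd]
theorem bfsStr_even (q : Nat) : bfsStr (2 * q + 2) = bfsStr q ++ "6" := by
  simp [bfsStr, bDigits_even]

-- A's loop state after k iterations: res holds strings 1..k, the queue holds k+1..2k+2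
theorem stepA_iter (k : Nat) :
    Nat.iterate stepA k ([], ["5", "6"]) =
      ((List.range' 1 k).map bfsStr, (List.range' (k + 1) (k + 2)).map bfsStr) := by
  induction k with
  | zero =>
      simp [List.range']
      constructor <;> (apply String.ext; simp [bfsStr, bDigits])
  | succ k ih =>
      rw [Function.iterate_succ_apply', ih]
      have hq : List.range' (k + 1) (k + 2) = (k + 1) :: List.range' (k + 2) (k + 1) := by
        rw [List.range'_succ]
      rw [hq]
      simp only [List.map_cons, stepA]
      refine Prod.ext ?_ ?_
      · have h1 : List.range' 1 (k + 1) = List.range' 1 k ++ [k + 1] := by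
          rw [List.range'_concat]; congr 1; simp [Nat.add_comm]
        rw [h1, List.map_append, List.map_singleton]
      · have h2 : List.range' (k + 2) (k + 3) =
            List.range' (k + 2) (k + 1) ++ [2 * k + 3, 2 * k + 4] := by
          rw [show k + 3 = (k + 2) + 1 from rfl, List.range'_concat]
          rw [show k + 2 = (k + 1) + 1 from rfl, List.range'_concat]
          simp; omega
        rw [h2]
        simp only [List.map_append, List.map_cons, List.map_nil, List.append_cancel_left_eq]
        rw [show 2 * k + 3 = 2 * (k + 1) + 1 from rfl, bfsStr_odd,
            show 2 * k + 4 = 2 * (k + 1) + 2 from rfl, bfsStr_even]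

-- a fold that ignores the elements is an iterate of the step
theorem foldl_const {α β : Type} (f : β → β) (l : List α) (b : β) :
    l.foldl (fun st _ => f st) b = Nat.iterate f l.length b := by
  induction l generalizing b with
  | nil => rfl
  | cons x xs ih => simp [List.foldl_cons, ih, Function.iterate_succ_apply]

theorem A_eq (n : Int) :
    generate_n_numbers_of_5_6_digits n = (List.range' 1 n.toNat).map bfsStr := by
  unfold generate_n_numbers_of_5_6_digits
  rw [foldl_const, PySem.List.length_pyRange_one]
  simp [stepA_iter]

theorem B_eq (n : Int) :
    generate_n_numbers_of_5_6_digits_alt n = (List.range' 1 n.toNat).map bfsStr := by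
  unfold generate_n_numbers_of_5_6_digits_alt
  rw [PySem.List.pyRange_one, List.foldl_map,
      PySem.List.foldl_append_singleton_eq_map]
  simp only [Int.sub_zero, List.nil_append]
  rw [List.range'_eq_map_range]
  rw [List.map_map]
  apply List.map_congr_left
  intro a _
  have h : (0 + (a : Int) + 1).toNat = a + 1 := by omega
  simp only [Function.comp_apply, bfsStr, h]
  rw [Nat.add_comm 1 a]

-- ===== VERDICT (by name: the statement is the Claim_ definition above) =====
theorem generate_n_numbers_of_5_6_digits_spec : Claim_equal_generate_n_numbers_of_5_6_digits := by
  intro n _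
  unfold Spec_generate_n_numbers_of_5_6_digits
  rw [A_eq, B_eq]
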